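-- pv_equiv track=rewrite | github.com/Mondego/pyreco | repoData/jdc0589-JsFormat/allPythonContent.py | diff_linesToChars
-- ===== SOURCE A (Python) =====
-- def diff_linesToChars(text1, text2):
--   """Split two texts into an array of strings.  Reduce the texts to a string
--   of hashes where each Unicode character represents one line.
--
--   Args:
--     text1: First string.
--     text2: Second string.
--
--   Returns:
--     Three element tuple, containing the encoded text1, the encoded text2 and
--     the array of unique strings.  The zeroth element of the array of unique
--     strings is intentionally blank.
--   """
--   lineArray = []  # e.g. lineArray[4] == "Hello\n"
--   lineHash = {}   # e.g. lineHash["Hello\n"] == 4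
--
--   # "\x00" is a valid character, but various debuggers don't like it.
--   # So we'll insert a junk entry to avoid generating a null character.
--   lineArray.append('')
--
--   def diff_linesToCharsMunge(text):
--     """Split a text into an array of strings.  Reduce the texts to a string
--     of hashes where each Unicode character represents one line.
--     Modifies linearray and linehash through being a closure.
--
--     Args:
--       text: String to encode.
--
--     Returns:
--       Encoded string.
--     """
--     chars = []
--     # Walk the text, pulling out a substring for each line.
--     # text.split('\n') would would temporarily double our memory footprint.
--     # Modifying text would create many large strings to garbage collect.
--     lineStart = 0
--     lineEnd = -1
--     while lineEnd < len(text) - 1: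
--       lineEnd = text.find('\n', lineStart)
--       if lineEnd == -1:
--         lineEnd = len(text) - 1
--       line = text[lineStart:lineEnd + 1]
--       lineStart = lineEnd + 1
--
--       if line in lineHash:
--         chars.append(chr(lineHash[line]))
--       else:
--         lineArray.append(line)
--         lineHash[line] = len(lineArray) - 1
--         chars.append(chr(len(lineArray) - 1))
--     return "".join(chars)
--
--   chars1 = diff_linesToCharsMunge(text1)
--   chars2 = diff_linesToCharsMunge(text2)
--   return (chars1, chars2, lineArray)
-- ===== SOURCE B (Python) =====
-- def diff_linesToChars(text1, text2):
--   lineArray = ['']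
--   lineHash = {}
--
--   def munge(text):
--     # one char-level pass: build the explicit list of lines first
--     lines = []
--     cur = []
--     for ch in text:
--       cur.append(ch)
--       if ch == '\n':
--         lines.append(''.join(cur))
--         cur = []
--     if cur:
--       lines.append(''.join(cur))
--     # then encode the line list against the shared dict
--     out = []
--     for line in lines:
--       if line not in lineHash:
--         lineHash[line] = len(lineArray)
--         lineArray.append(line)
--       out.append(chr(lineHash[line]))
--     return ''.join(out)
--
--   return (munge(text1), munge(text2), lineArray)
-- ===== Notes on version B (the rewrite author's own statement) =====
-- stated objective: simpler
-- what changed: B replaces A's index-arithmetic scanner (lineStart/lineEnd with text.find and slicing) by a single character-level pass that materialises the list of lines up front, then a plain dict-encoding loop over that list.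
import Mathlib
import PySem

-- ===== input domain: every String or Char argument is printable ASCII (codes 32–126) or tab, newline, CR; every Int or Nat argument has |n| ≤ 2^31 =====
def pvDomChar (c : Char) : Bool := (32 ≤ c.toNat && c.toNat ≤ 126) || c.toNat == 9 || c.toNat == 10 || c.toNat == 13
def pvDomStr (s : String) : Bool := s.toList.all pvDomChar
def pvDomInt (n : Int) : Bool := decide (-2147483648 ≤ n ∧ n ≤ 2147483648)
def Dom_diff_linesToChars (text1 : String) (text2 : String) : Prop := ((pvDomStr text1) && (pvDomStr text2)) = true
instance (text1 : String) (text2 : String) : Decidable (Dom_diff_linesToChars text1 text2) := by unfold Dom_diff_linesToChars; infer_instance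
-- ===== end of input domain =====

-- B replaces A's index-arithmetic scanner by one char-level pass that builds the line list up front, then a dict-encoding loop (objective: simpler).

-- ===== PORT A =====
-- A's while loop over lineStart/lineEnd; fuel = text.length + 1 is a totality guard only, never reached (each iteration advances lineStart).
def mungeA (text : List Char) (fuel : Nat) (lineStart : Int) (lineEnd : Int)
    (arr : List (List Char)) (hash : PySem.Dict (List Char) Nat) (chars : List Char) :
    List Char × List (List Char) × PySem.Dict (List Char) Nat :=
  match fuel with
  | 0 => (chars, arr, hash)
  | fuel + 1 =>
    if lineEnd < (text.length : Int) - 1 then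
      let f := PySem.Chars.findFrom text ['\n'] lineStart none
      let lineEnd' : Int := if f = -1 then (text.length : Int) - 1 else f
      let line := PySem.Chars.slice text (some lineStart) (some (lineEnd' + 1))
      let lineStart' := lineEnd' + 1
      match hash.get? line with
      | some v => mungeA text fuel lineStart' lineEnd' arr hash (chars ++ [Char.ofNat v])
      | none =>
        let arr' := arr ++ [line]
        let hash' := hash.insert line (arr'.length - 1)
        mungeA text fuel lineStart' lineEnd' arr' hash' (chars ++ [Char.ofNat (arr'.length - 1)])
    else (chars, arr, hash)

def diff_linesToChars (text1 : String) (text2 : String) : String × String × List String :=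
  let (chars1, arr1, hash1) := mungeA text1.toList (text1.toList.length + 1) 0 (-1) [[]] PySem.Dict.empty []
  let (chars2, arr2, _) := mungeA text2.toList (text2.toList.length + 1) 0 (-1) arr1 hash1 []
  (String.ofList chars1, String.ofList chars2, arr2.map String.ofList)

-- ===== PORT B =====
-- B's first loop: accumulate chars into cur, flush at '\n', flush a nonempty remainder.
def cstep (st : List (List Char) × List Char) (ch : Char) : List (List Char) × List Char :=
  let cur := st.2 ++ [ch]
  if ch = '\n' then (st.1 ++ [cur], []) else (st.1, cur)

def collectLines (text : List Char) : List (List Char) :=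
  let st := text.foldl cstep ([], [])
  if st.2 = [] then st.1 else st.1 ++ [st.2]

-- B's second loop over the line list ('lineHash[line]' after the insert always hits; getD 0 is the totalising guard).
def encodeB (lines : List (List Char)) (arr : List (List Char)) (hash : PySem.Dict (List Char) Nat)
    (out : List Char) : List Char × List (List Char) × PySem.Dict (List Char) Nat :=
  match lines with
  | [] => (out, arr, hash)
  | line :: rest =>
    let st :=
      if hash.contains line then (arr, hash) else (arr ++ [line], hash.insert line arr.length)
    encodeB rest st.1 st.2 (out ++ [Char.ofNat ((st.2.get? line).getD 0)])

def diff_linesToChars_alt (text1 : String) (text2 : String) : String × String × List String :=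
  let (chars1, arr1, hash1) := encodeB (collectLines text1.toList) [[]] PySem.Dict.empty []
  let (chars2, arr2, _) := encodeB (collectLines text2.toList) arr1 hash1 []
  (String.ofList chars1, String.ofList chars2, arr2.map String.ofList)

-- ===== PRECONDITION & SPEC =====
def Spec_diff_linesToChars (text1 : String) (text2 : String) (out : String × String × List String) : Prop := out = diff_linesToChars_alt text1 text2
instance (text1 : String) (text2 : String) (out : String × String × List String) : Decidable (Spec_diff_linesToChars text1 text2 out) := by unfold Spec_diff_linesToChars; infer_instance

-- ===== CLAIM (what is proved, stated in full; the proofs are below) =====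
def Claim_equal_diff_linesToChars : Prop := ∀ (text1 : String) (text2 : String), Dom_diff_linesToChars text1 text2 → Spec_diff_linesToChars text1 text2 (diff_linesToChars text1 text2)

-- ===== LEMMAS AND PROOFS =====

-- proof-side normal form of A's loop body, as a fold over an explicit line list
def encA (lines : List (List Char)) (arr : List (List Char)) (hash : PySem.Dict (List Char) Nat)
    (chars : List Char) : List Char × List (List Char) × PySem.Dict (List Char) Nat :=
  match lines with
  | [] => (chars, arr, hash)
  | line :: rest =>
    match hash.get? line with
    | some v => encA rest arr hash (chars ++ [Char.ofNat v])
    | none => encA rest (arr ++ [line]) (hash.insert line arr.length) (chars ++ [Char.ofNat arr.length])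

theorem encA_eq_encodeB (lines : List (List Char)) (arr : List (List Char))
    (hash : PySem.Dict (List Char) Nat) (out : List Char) :
    encA lines arr hash out = encodeB lines arr hash out := by
  induction lines generalizing arr hash out with
  | nil => rfl
  | cons line rest ih =>
    cases h : hash.get? line with
    | some v =>
      have hc : hash.contains line = true := by
        rcases Bool.eq_false_or_eq_true (hash.contains line) with ht | hf
        · exact ht
        · rw [(PySem.Dict.get?_eq_none_iff_contains hash line).2 hf] at h; cases h
      simp [encA, encodeB, h, hc, ih]
    | none =>
      have hc := (PySem.Dict.get?_eq_none_iff_contains hash line).1 h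
      simp [encA, encodeB, h, hc, PySem.Dict.get?_insert_self, ih]

theorem foldl_cstep_no_nl (cs : List Char) (L : List (List Char)) (cur : List Char)
    (h : '\n' ∉ cs) : List.foldl cstep (L, cur) cs = (L, cur ++ cs) := by
  induction cs generalizing cur with
  | nil => simp
  | cons c cs ih =>
    have hc : c ≠ '\n' := fun hc => h (by simp [hc])
    have hcs : '\n' ∉ cs := fun hm => h (by simp [hm])
    simp only [List.foldl_cons, cstep, if_neg hc, ih _ hcs]
    simp

theorem foldl_cstep_prepend (cs : List Char) (L : List (List Char)) (cur : List Char) :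
    List.foldl cstep (L, cur) cs
      = (L ++ (List.foldl cstep ([], cur) cs).1, (List.foldl cstep ([], cur) cs).2) := by
  induction cs generalizing L cur with
  | nil => simp
  | cons c cs ih =>
    by_cases hc : c = '\n'
    · simp only [List.foldl_cons, cstep, if_pos hc, List.nil_append]
      rw [ih (L ++ [cur ++ [c]]), ih ([cur ++ [c]])]
      simp
    · simp only [List.foldl_cons, cstep, if_neg hc]
      exact ih L (cur ++ [c])

theorem collect_no_nl (cs : List Char) (h : '\n' ∉ cs) (hne : cs ≠ []) :
    collectLines cs = [cs] := by
  simp [collectLines, foldl_cstep_no_nl cs [] [] h, hne]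

theorem collect_split (pre rest : List Char) (hpre : '\n' ∉ pre) :
    collectLines (pre ++ '\n' :: rest) = (pre ++ ['\n']) :: collectLines rest := by
  have h1 : List.foldl cstep ([], []) (pre ++ '\n' :: rest)
      = List.foldl cstep ([pre ++ ['\n']], []) rest := by
    rw [List.foldl_append, foldl_cstep_no_nl pre [] [] hpre]
    simp [cstep]
  unfold collectLines
  rw [h1, foldl_cstep_prepend rest [pre ++ ['\n']] []]
  by_cases h2 : (List.foldl cstep ([], []) rest).2 = [] <;> simp [h2]

theorem mungeA_eq (text : List Char) (n k : Nat) (arr : List (List Char))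
    (hash : PySem.Dict (List Char) Nat) (chars : List Char)
    (hk : k ≤ text.length) (hn : text.length - k < n) :
    mungeA text n ((k : Int)) ((k : Int) - 1) arr hash chars
      = encA (collectLines (text.drop k)) arr hash chars := by
  induction n generalizing k arr hash chars with
  | zero => omega
  | succ n ih =>
    by_cases hkl : k < text.length
    · -- loop runs
      have hcond : ((k : Int) - 1) < (text.length : Int) - 1 := by omega
      rw [mungeA, if_pos hcond]
      rw [PySem.Chars.findFrom_natCast text ['\n'] k hk]
      set g := PySem.Chars.find (text.drop k) ['\n'] with hgdef
      by_cases hgneg : g = -1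
      · -- no newline from position k on
        have hnot : '\n' ∉ text.drop k := by
          have := (PySem.Chars.find_eq_neg_one_iff (text.drop k) ['\n']).mp (hgdef ▸ hgneg)
          rwa [List.singleton_infix_iff] at this
        have hne : text.drop k ≠ [] := by
          intro hnil
          have := congrArg List.length hnil
          simp at this; omega
        have hline : PySem.List.slice text (some (k : Int)) (some ((text.length : Int)))
            = text.drop k := by
          have : ((text.length : Int)) = (((text.length : Nat)) : Int) := by ring
          rw [this, PySem.List.slice_natCast]
          exact List.take_of_length_le (by simp)
        have hrec : ∀ arr' hash' chars',
            mungeA text n ((text.length : Int)) ((text.length : Int) - 1) arr' hash' chars'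
              = (chars', arr', hash') := by
          intro arr' hash' chars'
          have h0 : ((text.length : Int)) = (((text.length : Nat)) : Int) := by ring
          rw [h0, ih text.length arr' hash' chars' le_rfl (by omega)]
          simp [collectLines, encA]
        rw [collect_no_nl _ hnot hne]
        simp only [if_pos hgneg]
        simp only [if_true]
        have hplus : ((text.length : Int) - 1) + 1 = ((text.length : Int)) := by ring
        simp only [hplus]
        cases h : hash.get? (text.drop k) with
        | some v => simp only [PySem.Chars.slice_eq_listSlice, hline, h, hrec, encA]
        | none =>
          simp only [PySem.Chars.slice_eq_listSlice, hline, h, hrec, encA]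
          simp
      · -- newline found at g ≥ 0 within drop k
        have hg0 : 0 ≤ g := by
          have := PySem.Chars.neg_one_le_find (text.drop k) ['\n']
          omega
        obtain ⟨hpref, hfirst⟩ := PySem.Chars.find_spec (s := text.drop k) (sub := ['\n']) hg0
        set gn := g.toNat with hgndef
        have hnl : (text.drop k)[gn]? = some '\n' := by
          rcases hpref with ⟨t, ht⟩
          rw [← List.head?_drop, ← ht]
          rfl
        obtain ⟨hgnlt, hgnval⟩ := List.getElem?_eq_some_iff.mp hnl
        have hprenl : '\n' ∉ (text.drop k).take gn := by
          intro hmem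
          obtain ⟨i, hi, hiv⟩ := List.getElem_of_mem hmem
          have hilt : i < gn := lt_of_lt_of_le hi (by simp)
          rw [List.getElem_take] at hiv
          apply hfirst i hilt
          refine ⟨List.drop (i + 1) (text.drop k), ?_⟩
          rw [List.singleton_append, ← hiv]
          exact List.getElem_cons_drop (by omega)
        have hdk : text.drop k = (text.drop k).take gn ++ '\n' :: text.drop (k + gn + 1) := by
          have h2 := List.getElem_cons_drop hgnlt
          rw [hgnval] at h2
          have h3 : List.drop (gn + 1) (text.drop k) = text.drop (k + gn + 1) := by
            rw [List.drop_drop, Nat.add_assoc]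
          rw [h3] at h2
          rw [h2]
          exact (List.take_append_drop gn (text.drop k)).symm
        have hfne : ¬((k : Int) + g = -1) := by omega
        simp only [if_neg hgneg, if_neg hfne]
        have hgcast : (k : Int) + g + 1 = ((k + gn + 1 : Nat) : Int) := by
          push_cast; omega
        have hline : PySem.List.slice text (some (k : Int)) (some ((k : Int) + g + 1))
            = (text.drop k).take gn ++ ['\n'] := by
          rw [hgcast, PySem.List.slice_natCast]
          have hsub : k + gn + 1 - k = gn + 1 := by omega
          rw [hsub, List.take_add_one, hnl]
          rfl
        have hdl : (List.drop k text).length = text.length - k := by simp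
        have hrec : ∀ arr' hash' chars',
            mungeA text n ((k : Int) + g + 1) ((k : Int) + g) arr' hash' chars'
              = encA (collectLines (text.drop (k + gn + 1))) arr' hash' chars' := by
          intro arr' hash' chars'
          have h1 : (k : Int) + g = ((k + gn + 1 : Nat) : Int) - 1 := by omega
          rw [hgcast, h1]
          exact ih (k + gn + 1) arr' hash' chars' (by omega) (by omega)
        have hcollect : collectLines (text.drop k)
            = ((text.drop k).take gn ++ ['\n']) :: collectLines (text.drop (k + gn + 1)) := by
          conv_lhs => rw [hdk]
          exact collect_split _ _ hprenl
        rw [hcollect]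
        cases h : hash.get? ((text.drop k).take gn ++ ['\n']) with
        | some v => simp only [PySem.Chars.slice_eq_listSlice, hline, h, hrec, encA]
        | none =>
          simp only [PySem.Chars.slice_eq_listSlice, hline, h, hrec, encA]
          simp
    · -- loop exits: k = length
      have hkeq : k = text.length := le_antisymm hk (not_lt.mp hkl)
      have hcond : ¬ (((k : Int) - 1) < (text.length : Int) - 1) := by
        rw [hkeq]; omega
      rw [mungeA, if_neg hcond, hkeq, List.drop_length]
      simp [collectLines, encA]

-- ===== VERDICT (by name: the statement is the Claim_ definition above) =====
theorem diff_linesToChars_spec : Claim_equal_diff_linesToChars := by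
  intro text1 text2 _
  show diff_linesToChars text1 text2 = diff_linesToChars_alt text1 text2
  have h1 : ∀ (t : List Char) arr hash,
      mungeA t (t.length + 1) 0 (-1) arr hash []
        = encodeB (collectLines t) arr hash [] := by
    intro t arr hash
    have := mungeA_eq t (t.length + 1) 0 arr hash [] (by omega) (by omega)
    simp only [Nat.cast_zero, zero_sub, List.drop_zero] at this
    rw [this, encA_eq_encodeB]
  unfold diff_linesToChars diff_linesToChars_alt
  simp only [h1]
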